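-- pv_equiv track=rewrite | github.com/zalocncn/events | enlima_calendar.py | dedupe_repeating_events
-- ===== SOURCE A (Python) =====
-- MONTH_ES = ("", "Ene", "Feb", "Mar", "Abr", "May", "Jun", "Jul", "Ago", "Sep", "Oct", "Nov", "Dic")
--
-- def event_key(ev):
--     """Unique key for deduplication: same title + url = same event."""
--     return (ev.get("title", "").strip(), ev.get("url", "").strip())
--
-- def format_date_short(date_key):
--     """e.g. 2026-02-15 -> '15 Ene' (day + month)."""
--     try:
--         y, m, d = date_key.split("-")
--         return f"{int(d)} {MONTH_ES[int(m)]}"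
--     except Exception:
--         return date_key
--
-- def dedupe_repeating_events(events_by_day):
--     """
--     If the same event (same title+url) appears on multiple days, show it only on
--     the first day and add a 'schedule' note (date range).
--     """
--     # Collect (date_key, event) and group by event_key
--     by_event = {}
--     for date_key in sorted(events_by_day.keys()):
--         for ev in events_by_day[date_key]:
--             k = event_key(ev)
--             if k not in by_event:
--                 by_event[k] = []
--             by_event[k].append((date_key, dict(ev)))
--
--     # For each event that appears on 2+ days, keep only first day and set schedule
--     for k, date_ev_list in by_event.items():
--         if len(date_ev_list) < 2:
--             continue
--         dates = sorted(d[0] for d in date_ev_list)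
--         first_date = dates[0]
--         last_date = dates[-1]
--         # Use the event from the first day
--         ev = date_ev_list[0][1]
--         ev["schedule"] = f"Del {format_date_short(first_date)} al {format_date_short(last_date)}"
--         # Remove this event from every day
--         for date_key in events_by_day:
--             events_by_day[date_key] = [
--                 e for e in events_by_day[date_key]
--                 if event_key(e) != k
--             ]
--         # Add it only on the first day
--         events_by_day[first_date].append(ev)
--
--     return events_by_day
-- ===== SOURCE B (Python) =====
-- MONTH_ES = ("", "Ene", "Feb", "Mar", "Abr", "May", "Jun", "Jul", "Ago", "Sep", "Oct", "Nov", "Dic")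
--
-- def event_key(ev):
--     return (ev.get("title", "").strip(), ev.get("url", "").strip())
--
-- def format_date_short(date_key):
--     try:
--         y, m, d = date_key.split("-")
--         return f"{int(d)} {MONTH_ES[int(m)]}"
--     except Exception:
--         return date_key
--
-- def dedupe_repeating_events(events_by_day):
--     # One pass over the sorted days builds, per event key, (count, first day,
--     # copy of first event, last day); a second pass rebuilds every day's list
--     # in place: keep globally-unique events, then append this day's
--     # representatives (first occurrences of repeated keys) with a schedule.
--     stats = {}  # key -> (count, first_day, first_event_copy, last_day)
--     for d in sorted(events_by_day):
--         for ev in events_by_day[d]: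
--             k = event_key(ev)
--             if k in stats:
--                 cnt, fd, fe, _ = stats[k]
--                 stats[k] = (cnt + 1, fd, fe, d)
--             else:
--                 stats[k] = (1, d, dict(ev), d)
--     reps_by_day = {}
--     for k, (cnt, fd, fe, ld) in stats.items():
--         if cnt >= 2:
--             fe["schedule"] = f"Del {format_date_short(fd)} al {format_date_short(ld)}"
--             reps_by_day.setdefault(fd, []).append(fe)
--     for d in events_by_day:
--         events_by_day[d] = [ev for ev in events_by_day[d]
--                             if stats[event_key(ev)][0] == 1] + reps_by_day.get(d, [])
--     return events_by_day
-- ===== Notes on version B (the rewrite author's own statement) =====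
-- stated objective: alternative
-- what changed: A groups occurrences and then, for every repeated key, rescans and rewrites every day's list and re-appends the representative; B makes one counting pass over the sorted days building per-key (count, first day, first event, last day), then rebuilds each day's list once, keeping unique events and appending that day's representatives.
import Mathlib
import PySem

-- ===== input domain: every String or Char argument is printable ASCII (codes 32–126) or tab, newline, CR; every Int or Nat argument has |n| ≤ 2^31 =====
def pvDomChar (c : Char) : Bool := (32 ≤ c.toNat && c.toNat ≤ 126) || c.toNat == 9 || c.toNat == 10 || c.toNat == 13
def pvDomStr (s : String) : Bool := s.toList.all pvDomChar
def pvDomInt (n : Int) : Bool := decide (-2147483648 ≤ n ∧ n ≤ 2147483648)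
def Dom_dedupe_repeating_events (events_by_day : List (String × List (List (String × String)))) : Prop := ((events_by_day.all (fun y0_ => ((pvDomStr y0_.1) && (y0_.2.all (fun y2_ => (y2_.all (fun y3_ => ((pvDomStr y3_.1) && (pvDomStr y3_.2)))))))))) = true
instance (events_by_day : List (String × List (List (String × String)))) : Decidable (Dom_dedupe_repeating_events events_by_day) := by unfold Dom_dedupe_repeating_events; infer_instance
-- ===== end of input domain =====

-- B replaces A's per-repeated-key rescans of every day (remove everywhere, re-append) by one
-- counting pass over the sorted days plus a single rebuild of each day's list (objective: alternative).
-- Both A and B mutate the argument dict in place in Python; the equivalence proved here is about the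
-- return value (which is that same dict).

-- ===== PORT A =====
def pvMONTH_ES : List String := ["", "Ene", "Feb", "Mar", "Abr", "May", "Jun", "Jul", "Ago", "Sep", "Oct", "Nov", "Dic"]

-- ev.get("title", "").strip(), ev.get("url", "").strip()
def pvEventKey (ev : List (String × String)) : String × String :=
  (PySem.Str.strip ((PySem.Dict.mk ev).getD "title" ""),
   PySem.Str.strip ((PySem.Dict.mk ev).getD "url" ""))

-- format_date_short: try y,m,d = split("-"); f"{int(d)} {MONTH_ES[int(m)]}" except: date_key
def pvFormatDateShort (dk : String) : String :=
  match PySem.Str.split? dk "-" with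
  | some [_, m, d] =>
    match PySem.Int.ofStr? d, PySem.Int.ofStr? m with
    | some di, some mi =>
      match PySem.List.pyGet? pvMONTH_ES mi with
      | some mon => PySem.Int.toStr di ++ " " ++ mon
      | none => dk
    | _, _ => dk
  | _ => dk

-- events_by_day[first_date].append(ev): append at the (unique) matching day key
def pvSetFirst : List (String × List (List (String × String))) → String → List (String × String) → List (String × List (List (String × String)))
  | [], _, _ => []
  | de :: rest, k, ev => if de.1 == k then (de.1, de.2 ++ [ev]) :: rest else de :: pvSetFirst rest k ev

def dedupe_repeating_events (events_by_day : List (String × List (List (String × String)))) : List (String × List (List (String × String))) :=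
  let by_event : PySem.Dict (String × String) (List (String × List (String × String))) :=
    (PySem.List.sorted (events_by_day.map Prod.fst) (fun x => x) false).foldl (fun acc date_key =>
      ((PySem.Dict.mk events_by_day).getD date_key []).foldl (fun acc ev =>
        let k := pvEventKey ev
        let acc1 := if acc.contains k then acc else acc.insert k []
        acc1.insert k (acc1.getD k [] ++ [(date_key, ev)])) acc) PySem.Dict.empty
  by_event.items.foldl (fun ebd kl =>
    if kl.2.length < 2 then ebd
    else
      let dates := PySem.List.sorted (kl.2.map Prod.fst) (fun x => x) false
      let first_date := PySem.List.pyGetD dates 0 ""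
      let last_date := PySem.List.pyGetD dates (-1) ""
      let ev0 := (PySem.List.pyGetD kl.2 0 ("", [])).2
      let ev := ((PySem.Dict.mk ev0).insert "schedule"
        ("Del " ++ pvFormatDateShort first_date ++ " al " ++ pvFormatDateShort last_date)).items
      let ebd1 := ebd.map (fun de => (de.1, de.2.filter (fun e => pvEventKey e != kl.1)))
      pvSetFirst ebd1 first_date ev) events_by_day

-- ===== PORT B =====
def dedupe_repeating_events_alt (events_by_day : List (String × List (List (String × String)))) : List (String × List (List (String × String))) :=
  let stats : PySem.Dict (String × String) (Int × String × List (String × String) × String) :=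
    (PySem.List.sorted (events_by_day.map Prod.fst) (fun x => x) false).foldl (fun st d =>
      ((PySem.Dict.mk events_by_day).getD d []).foldl (fun st ev =>
        let k := pvEventKey ev
        match st.get? k with
        | some (cnt, fd, fe, _) => st.insert k (cnt + 1, fd, fe, d)
        | none => st.insert k (1, d, ev, d)) st) PySem.Dict.empty
  let reps : PySem.Dict String (List (List (String × String))) :=
    stats.items.foldl (fun r q =>
      if q.2.1 ≥ 2 then
        let fe' := ((PySem.Dict.mk q.2.2.2.1).insert "schedule"
          ("Del " ++ pvFormatDateShort q.2.2.1 ++ " al " ++ pvFormatDateShort q.2.2.2.2)).items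
        r.modify q.2.2.1 [] (· ++ [fe'])
      else r) PySem.Dict.empty
  events_by_day.map (fun de => (de.1,
    de.2.filter (fun ev => (stats.getD (pvEventKey ev) (0, "", [], "")).1 == 1) ++ reps.getD de.1 []))

-- ===== PRECONDITION & SPEC =====
-- Pre_ excludes association lists with duplicate dictionary keys (a duplicated day key, or a
-- duplicated key inside one event): those cannot arise from the Python dicts A operates on.
def Pre_dedupe_repeating_events (events_by_day : List (String × List (List (String × String)))) : Prop :=
  (events_by_day.map Prod.fst).Nodup ∧
    ∀ de ∈ events_by_day, ∀ ev ∈ de.2, (ev.map Prod.fst).Nodup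

instance (events_by_day : List (String × List (List (String × String)))) : Decidable (Pre_dedupe_repeating_events events_by_day) := by
  unfold Pre_dedupe_repeating_events; infer_instance

def pvWitness_dedupe_repeating_events : (List (String × List (List (String × String)))) :=
  [("2026-02-15", [[("title", "A "), ("url", "u")], [("title", "B")]]),
   ("2026-02-10", [[("title", "A"), ("url", "u ")]]),
   ("2026-03-01", [[("title", "A"), ("url", "u")]])]

def Spec_dedupe_repeating_events (events_by_day : List (String × List (List (String × String)))) (out : List (String × List (List (String × String)))) : Prop := out = dedupe_repeating_events_alt events_by_day
instance (events_by_day : List (String × List (List (String × String)))) (out : List (String × List (List (String × String)))) : Decidable (Spec_dedupe_repeating_events events_by_day out) := by unfold Spec_dedupe_repeating_events; infer_instance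

-- ===== CLAIM (what is proved, stated in full; the proofs are below) =====
def Claim_equal_dedupe_repeating_events : Prop := ∀ (events_by_day : List (String × List (List (String × String)))), Dom_dedupe_repeating_events events_by_day → Pre_dedupe_repeating_events events_by_day → Spec_dedupe_repeating_events events_by_day (dedupe_repeating_events events_by_day)

-- ===== LEMMAS AND PROOFS =====

-- Abbreviations used only by the proofs
def pvEvs (ebd : List (String × List (List (String × String)))) (d : String) : List (List (String × String)) :=
  (PySem.Dict.mk ebd).getD d []

-- all (day, event) occurrences, in the order both phase-1 loops visit them
def pvOcc (ebd : List (String × List (List (String × String)))) : List (String × List (String × String)) :=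
  (PySem.List.sorted (ebd.map Prod.fst) (fun x => x) false).flatMap
    (fun d => (pvEvs ebd d).map (fun ev => (d, ev)))

def pvG (ebd : List (String × List (List (String × String)))) (k : String × String) : List (String × List (String × String)) :=
  (pvOcc ebd).filter (fun p => pvEventKey p.2 == k)

def pvK (ebd : List (String × List (List (String × String)))) : List (String × String) :=
  PySem.Set.ofList ((pvOcc ebd).map (fun p => pvEventKey p.2))

def pvSched (l : List (String × List (String × String))) : String :=
  "Del " ++ pvFormatDateShort l.headI.1 ++ " al " ++ pvFormatDateShort (l.getLastD ("", [])).1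

def pvRep (l : List (String × List (String × String))) : List (String × String) :=
  ((PySem.Dict.mk l.headI.2).insert "schedule" (pvSched l)).items

def pvSummar (l : List (String × List (String × String))) : Int × String × List (String × String) × String :=
  ((l.length : Int), l.headI.1, l.headI.2, (l.getLastD ("", [])).1)

def pvStep2 (ebd : List (String × List (List (String × String)))) (kl : (String × String) × List (String × List (String × String))) : List (String × List (List (String × String))) :=
  if kl.2.length < 2 then ebd
  else
    let dates := PySem.List.sorted (kl.2.map Prod.fst) (fun x => x) false
    let first_date := PySem.List.pyGetD dates 0 ""
    let last_date := PySem.List.pyGetD dates (-1) ""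
    let ev0 := (PySem.List.pyGetD kl.2 0 ("", [])).2
    let ev := ((PySem.Dict.mk ev0).insert "schedule"
      ("Del " ++ pvFormatDateShort first_date ++ " al " ++ pvFormatDateShort last_date)).items
    let ebd1 := ebd.map (fun de => (de.1, de.2.filter (fun e => pvEventKey e != kl.1)))
    pvSetFirst ebd1 first_date ev

def pvByEvent (ebd : List (String × List (List (String × String)))) : PySem.Dict (String × String) (List (String × List (String × String))) :=
  (PySem.List.sorted (ebd.map Prod.fst) (fun x => x) false).foldl (fun acc date_key =>
    ((PySem.Dict.mk ebd).getD date_key []).foldl (fun acc ev =>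
      let k := pvEventKey ev
      let acc1 := if acc.contains k then acc else acc.insert k []
      acc1.insert k (acc1.getD k [] ++ [(date_key, ev)])) acc) PySem.Dict.empty

def pvStepB (st : PySem.Dict (String × String) (Int × String × List (String × String) × String)) (p : String × List (String × String)) : PySem.Dict (String × String) (Int × String × List (String × String) × String) :=
  let k := pvEventKey p.2
  match st.get? k with
  | some (cnt, fd, fe, _) => st.insert k (cnt + 1, fd, fe, p.1)
  | none => st.insert k (1, p.1, p.2, p.1)

def pvStats (ebd : List (String × List (List (String × String)))) : PySem.Dict (String × String) (Int × String × List (String × String) × String) :=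
  (PySem.List.sorted (ebd.map Prod.fst) (fun x => x) false).foldl (fun st d =>
    ((PySem.Dict.mk ebd).getD d []).foldl (fun st ev =>
      let k := pvEventKey ev
      match st.get? k with
      | some (cnt, fd, fe, _) => st.insert k (cnt + 1, fd, fe, d)
      | none => st.insert k (1, d, ev, d)) st) PySem.Dict.empty

def pvShape (ebd : List (String × List (List (String × String)))) (S : List (String × String)) : List (String × List (List (String × String))) :=
  ebd.map (fun de => (de.1,
    de.2.filter (fun e => !(S.any (· == pvEventKey e)))
      ++ (S.filter (fun k => (pvG ebd k).headI.1 == de.1)).map (fun k => pvRep (pvG ebd k))))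

lemma pvStepA_modify (acc : PySem.Dict (String × String) (List (String × List (String × String)))) (p : String × List (String × String)) :
    (let k := pvEventKey p.2
     let acc1 := if acc.contains k then acc else acc.insert k []
     acc1.insert k (acc1.getD k [] ++ [p])) = acc.modify (pvEventKey p.2) [] (· ++ [p]) := by
  by_cases h : acc.contains (pvEventKey p.2) = true
  · simp [h, PySem.Dict.modify]
  · simp only [Bool.not_eq_true] at h
    simp [h, PySem.Dict.modify, PySem.Dict.insert_insert_self, PySem.Dict.getD_insert_self,
      PySem.Dict.getD_of_not_contains acc [] h]

lemma pvA_eq (ebd : List (String × List (List (String × String)))) :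
    dedupe_repeating_events ebd = (pvByEvent ebd).items.foldl pvStep2 ebd := by
  rfl

lemma pvFoldl_flatMap {α β γ : Type} (l : List α) (g : α → List β) (f : γ → β → γ) (init : γ) :
    (l.flatMap g).foldl f init = l.foldl (fun st a => (g a).foldl f st) init := by
  induction l generalizing init with
  | nil => rfl
  | cons a l ih => simp [List.flatMap_cons, List.foldl_append, ih]

lemma pvNestFold {γ : Type} (ebd : List (String × List (List (String × String)))) (f : γ → String × List (String × String) → γ) (init : γ) :
    (PySem.List.sorted (ebd.map Prod.fst) (fun x => x) false).foldl
      (fun st d => (pvEvs ebd d).foldl (fun st ev => f st (d, ev)) st) init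
    = (pvOcc ebd).foldl f init := by
  rw [pvOcc, pvFoldl_flatMap]
  simp [List.foldl_map]

lemma pvHeadI_append {α : Type} [Inhabited α] (l l' : List α) (h : l ≠ []) : (l ++ l').headI = l.headI := by
  cases l <;> simp_all

lemma pvByEvent_eq (ebd : List (String × List (List (String × String)))) :
    pvByEvent ebd = (pvOcc ebd).foldl (fun acc p => acc.modify (pvEventKey p.2) [] (· ++ [p])) PySem.Dict.empty := by
  refine Eq.trans ?_ (pvNestFold ebd (fun acc p => acc.modify (pvEventKey p.2) [] (· ++ [p])) PySem.Dict.empty)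
  refine PySem.List.foldl_congr_mem _ _ _ _ (fun acc d _ => ?_)
  refine PySem.List.foldl_congr_mem _ _ _ _ (fun acc ev _ => ?_)
  exact pvStepA_modify acc (d, ev)

lemma pvByEvent_getD (ebd : List (String × List (List (String × String)))) (k : String × String) :
    (pvByEvent ebd).getD k [] = pvG ebd k := by
  rw [pvByEvent_eq]
  have h1 : (pvOcc ebd).foldl (fun acc p => acc.modify (pvEventKey p.2) [] (· ++ [p])) PySem.Dict.empty
      = ((pvOcc ebd).map (fun p => (pvEventKey p.2, p))).foldl (fun d q => d.modify q.1 [] (· ++ [q.2])) PySem.Dict.empty := by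
    rw [List.foldl_map]
  rw [h1, PySem.Dict.getD_foldl_modify_append]
  simp [pvG, List.filter_map, Function.comp_def, List.map_map]

lemma pvByEvent_keys (ebd : List (String × List (List (String × String)))) :
    (pvByEvent ebd).keys = pvK ebd := by
  rw [pvByEvent_eq, PySem.Dict.keys_foldl_modify_key (pvOcc ebd) (fun p => pvEventKey p.2) []
    (fun _ p => (· ++ [p])) PySem.Dict.empty]
  rw [PySem.Dict.keys_empty, pvK, PySem.Set.ofList_eq_foldl]
  rfl

lemma pvByEvent_items (ebd : List (String × List (List (String × String)))) :
    (pvByEvent ebd).items = (pvK ebd).map (fun k => (k, pvG ebd k)) := by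
  rw [PySem.Dict.items_eq_map_keys _ (by rw [pvByEvent_keys]; exact PySem.Set.nodup_ofList _) []]
  rw [pvByEvent_keys]
  simp only [pvByEvent_getD]

lemma pvStats_eq (ebd : List (String × List (List (String × String)))) :
    pvStats ebd = (pvOcc ebd).foldl pvStepB PySem.Dict.empty := by
  rw [← pvNestFold (f := pvStepB)]
  rfl

lemma pvStatsF_items (occ : List (String × List (String × String))) :
    (occ.foldl pvStepB PySem.Dict.empty).items
      = (PySem.Set.ofList (occ.map (fun p => pvEventKey p.2))).map
          (fun k => (k, pvSummar (occ.filter (fun p => pvEventKey p.2 == k)))) := by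
  induction occ using List.reverseRecOn with
  | nil => rfl
  | append_singleton occ p ih =>
    rw [List.foldl_append]
    simp only [List.foldl_cons, List.foldl_nil]
    have hkeys : (occ.foldl pvStepB PySem.Dict.empty).keys
        = PySem.Set.ofList (occ.map (fun p => pvEventKey p.2)) := by
      have h0 : (occ.foldl pvStepB PySem.Dict.empty).keys
          = (occ.foldl pvStepB PySem.Dict.empty).items.map Prod.fst := rfl
      rw [h0, ih, List.map_map]
      simp [Function.comp_def]
    have hknodup : (occ.foldl pvStepB PySem.Dict.empty).keys.Nodup := by
      rw [hkeys]; exact PySem.Set.nodup_ofList _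
    have hmapapp : (occ ++ [p]).map (fun q => pvEventKey q.2)
        = occ.map (fun q => pvEventKey q.2) ++ [pvEventKey p.2] := by simp
    have hofl : PySem.Set.ofList (occ.map (fun q => pvEventKey q.2) ++ [pvEventKey p.2])
        = PySem.Set.add (PySem.Set.ofList (occ.map (fun q => pvEventKey q.2))) (pvEventKey p.2) := by
      rw [PySem.Set.ofList_eq_foldl, PySem.Set.ofList_eq_foldl, List.foldl_append]
      rfl
    by_cases hmem : pvEventKey p.2 ∈ PySem.Set.ofList (occ.map (fun q => pvEventKey q.2))
    · -- existing key
      have hGne : occ.filter (fun q => pvEventKey q.2 == pvEventKey p.2) ≠ [] := by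
        rw [PySem.Set.mem_ofList] at hmem
        obtain ⟨q, hq, hkq⟩ := List.mem_map.mp hmem
        exact List.ne_nil_of_mem (List.mem_filter.mpr ⟨hq, by simp [hkq]⟩)
      have hitems : (pvEventKey p.2, pvSummar (occ.filter (fun q => pvEventKey q.2 == pvEventKey p.2)))
          ∈ (occ.foldl pvStepB PySem.Dict.empty).items := by
        rw [ih]; exact List.mem_map_of_mem hmem
      have hget : (occ.foldl pvStepB PySem.Dict.empty).get? (pvEventKey p.2)
          = some (pvSummar (occ.filter (fun q => pvEventKey q.2 == pvEventKey p.2))) :=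
        PySem.Dict.get?_of_mem_items _ hitems hknodup
      have hcont : (occ.foldl pvStepB PySem.Dict.empty).contains (pvEventKey p.2) = true :=
        (PySem.Dict.contains_iff_mem_keys _ _).mpr (by rw [hkeys]; exact hmem)
      have hadd : PySem.Set.add (PySem.Set.ofList (occ.map (fun q => pvEventKey q.2))) (pvEventKey p.2)
          = PySem.Set.ofList (occ.map (fun q => pvEventKey q.2)) := by
        simp [PySem.Set.add, PySem.Set.contains, List.contains_eq_mem, hmem]
      rw [pvStepB]
      simp only [hget, pvSummar]
      rw [PySem.Dict.items_insert_of_contains _ _ hcont, ih, List.map_map, hmapapp, hofl, hadd]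
      refine List.map_congr_left ?_
      intro k hk
      simp only [Function.comp_apply]
      by_cases hkk : k = pvEventKey p.2
      · subst hkk
        simp only [beq_self_eq_true, if_true]
        have hfil : (occ ++ [p]).filter (fun q => pvEventKey q.2 == pvEventKey p.2)
            = occ.filter (fun q => pvEventKey q.2 == pvEventKey p.2) ++ [p] := by
          rw [List.filter_append]; simp
        rw [hfil]
        simp [pvHeadI_append _ _ hGne]
      · have hbeq : (k == pvEventKey p.2) = false := by simpa using hkk
        simp only [hbeq, if_false, Bool.false_eq_true]
        have hb : (pvEventKey p.2 == k) = false := by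
          simp only [beq_eq_false_iff_ne]
          exact fun h => hkk h.symm
        have hfil : (occ ++ [p]).filter (fun q => pvEventKey q.2 == k)
            = occ.filter (fun q => pvEventKey q.2 == k) := by
          rw [List.filter_append]
          simp [hb]
        rw [hfil]
        simp [pvSummar]
    · -- new key
      have hget : (occ.foldl pvStepB PySem.Dict.empty).get? (pvEventKey p.2) = none :=
        (PySem.Dict.get?_eq_none_iff_not_mem_keys _ _).mpr (by rw [hkeys]; exact hmem)
      have hcont : (occ.foldl pvStepB PySem.Dict.empty).contains (pvEventKey p.2) = false := by
        rw [← Bool.not_eq_true]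
        intro hcon
        exact hmem (by rw [← hkeys]; exact (PySem.Dict.contains_iff_mem_keys _ _).mp hcon)
      have hadd : PySem.Set.add (PySem.Set.ofList (occ.map (fun q => pvEventKey q.2))) (pvEventKey p.2)
          = PySem.Set.ofList (occ.map (fun q => pvEventKey q.2)) ++ [pvEventKey p.2] := by
        simp [PySem.Set.add, PySem.Set.contains, List.contains_eq_mem, hmem]
      rw [pvStepB]
      simp only [hget]
      rw [PySem.Dict.items_insert_of_not_contains _ _ hcont, ih, hmapapp, hofl, hadd, List.map_append]
      congr 1
      · refine List.map_congr_left ?_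
        intro k hk
        have hkk : k ≠ pvEventKey p.2 := fun hcon => hmem (hcon ▸ hk)
        have hb : (pvEventKey p.2 == k) = false := by
          simp only [beq_eq_false_iff_ne]
          exact fun h => hkk h.symm
        have hfil : (occ ++ [p]).filter (fun q => pvEventKey q.2 == k)
            = occ.filter (fun q => pvEventKey q.2 == k) := by
          rw [List.filter_append]
          simp [hb]
        rw [hfil]
      · have hfil0 : occ.filter (fun q => pvEventKey q.2 == pvEventKey p.2) = [] := by
          rw [List.filter_eq_nil_iff]
          intro q hq hcon
          exact hmem (PySem.Set.mem_ofList _ _ |>.mpr (List.mem_map.mpr ⟨q, hq, by simpa using hcon⟩))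
        have hfil : (occ ++ [p]).filter (fun q => pvEventKey q.2 == pvEventKey p.2) = [p] := by
          rw [List.filter_append, hfil0]; simp
        simp only [List.map_cons, List.map_nil, hfil]
        rfl

lemma pvStats_items (ebd : List (String × List (List (String × String)))) :
    (pvStats ebd).items = (pvK ebd).map (fun k => (k, pvSummar (pvG ebd k))) := by
  rw [pvStats_eq, pvStatsF_items]; rfl

lemma pvOcc_days_pairwise (ebd : List (String × List (List (String × String)))) :
    List.Pairwise (· ≤ ·) ((pvOcc ebd).map Prod.fst) := by
  rw [pvOcc, List.map_flatMap]
  rw [List.pairwise_flatMap]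
  constructor
  · intro d _
    simp only [List.map_map]
    refine List.pairwise_map.mpr ?_
    exact List.pairwise_of_forall (fun _ _ => le_refl d)
  · refine List.Pairwise.imp ?_ (PySem.List.sorted_pairwise (ebd.map Prod.fst) (fun x => x))
    intro d1 d2 h12 x hx y hy
    simp only [List.map_map, List.mem_map] at hx hy
    obtain ⟨_, _, rfl⟩ := hx
    obtain ⟨_, _, rfl⟩ := hy
    exact h12

lemma pvSorted_of_pairwise (l : List String) (h : List.Pairwise (· ≤ ·) l) :
    PySem.List.sorted l (fun x => x) false = l := by
  refine PySem.List.eq_of_perm_of_pairwise_le_of_injective (fun x => x) (fun a b hab => hab)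
    (PySem.List.sorted_perm l (fun x => x) false) ?_ h
  exact PySem.List.sorted_pairwise l (fun x => x)

lemma pvG_days_sorted (ebd : List (String × List (List (String × String)))) (k : String × String) :
    PySem.List.sorted ((pvG ebd k).map Prod.fst) (fun x => x) false = (pvG ebd k).map Prod.fst := by
  refine pvSorted_of_pairwise _ ?_
  exact List.Pairwise.sublist (List.Sublist.map Prod.fst List.filter_sublist) (pvOcc_days_pairwise ebd)

lemma pvG_ne (ebd : List (String × List (List (String × String)))) (k : String × String) (h : k ∈ pvK ebd) :
    pvG ebd k ≠ [] := by
  rw [pvK, PySem.Set.mem_ofList] at h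
  obtain ⟨p, hp, hkey⟩ := List.mem_map.mp h
  exact List.ne_nil_of_mem (List.mem_filter.mpr ⟨hp, by simp [hkey]⟩)

lemma pvKey_of_mem_G (ebd : List (String × List (List (String × String)))) (k : String × String)
    (p : String × List (String × String)) (h : p ∈ pvG ebd k) : pvEventKey p.2 = k := by
  have := List.of_mem_filter h
  simpa using this

lemma pvKey_insert_schedule (e : List (String × String)) (s : String) :
    pvEventKey (((PySem.Dict.mk e).insert "schedule" s).items) = pvEventKey e := by
  have h : ∀ (d : PySem.Dict String String), PySem.Dict.mk d.items = d := fun _ => rfl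
  rw [pvEventKey, pvEventKey, h]
  rw [PySem.Dict.getD_insert_of_ne _ s "" (by decide), PySem.Dict.getD_insert_of_ne _ s "" (by decide)]

lemma pvKey_rep (ebd : List (String × List (List (String × String)))) (k : String × String) (h : k ∈ pvK ebd) :
    pvEventKey (pvRep (pvG ebd k)) = k := by
  have hne := pvG_ne ebd k h
  have hmem : (pvG ebd k).headI ∈ pvG ebd k := by
    cases hG : pvG ebd k with
    | nil => exact absurd hG hne
    | cons a t => simp
  rw [pvRep, pvKey_insert_schedule]
  exact pvKey_of_mem_G ebd k _ hmem

lemma pvFd_mem_days (ebd : List (String × List (List (String × String)))) (k : String × String) (h : k ∈ pvK ebd) :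
    (pvG ebd k).headI.1 ∈ ebd.map Prod.fst := by
  have hne := pvG_ne ebd k h
  have hmem : (pvG ebd k).headI ∈ pvG ebd k := by
    cases hG : pvG ebd k with
    | nil => exact absurd hG hne
    | cons a t => simp
  have hocc : (pvG ebd k).headI ∈ pvOcc ebd := List.mem_of_mem_filter hmem
  obtain ⟨d, hd, hp⟩ := List.mem_flatMap.mp hocc
  obtain ⟨ev, _, heq⟩ := List.mem_map.mp hp
  have h1 : (pvG ebd k).headI.1 = d := by rw [← heq]
  rw [h1]
  exact ((PySem.List.sorted_perm (ebd.map Prod.fst) (fun x => x) false)).mem_iff.mp hd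

lemma pvEvs_of_mem (ebd : List (String × List (List (String × String)))) (hnd : (ebd.map Prod.fst).Nodup)
    (de : String × List (List (String × String))) (h : de ∈ ebd) : pvEvs ebd de.1 = de.2 := by
  have h1 : (de.1, de.2) ∈ (PySem.Dict.mk ebd).items := by simpa using h
  exact PySem.Dict.getD_of_mem_items _ h1 (by simpa [PySem.Dict.keys] using hnd) []

lemma pvMem_occ (ebd : List (String × List (List (String × String)))) (hnd : (ebd.map Prod.fst).Nodup)
    (de : String × List (List (String × String))) (hde : de ∈ ebd)
    (e : List (String × String)) (he : e ∈ de.2) : (de.1, e) ∈ pvOcc ebd := by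
  rw [pvOcc]
  refine List.mem_flatMap.mpr ⟨de.1, ?_, ?_⟩
  · exact ((PySem.List.sorted_perm (ebd.map Prod.fst) (fun x => x) false)).mem_iff.mpr
      (List.mem_map_of_mem hde)
  · rw [pvEvs_of_mem ebd hnd de hde]
    exact List.mem_map_of_mem he

lemma pvSetFirst_map (ebd : List (String × List (List (String × String))))
    (F : String × List (List (String × String)) → List (List (String × String)))
    (fd : String) (v : List (String × String))
    (hnd : (ebd.map Prod.fst).Nodup) (hfd : fd ∈ ebd.map Prod.fst) :
    pvSetFirst (ebd.map (fun de => (de.1, F de))) fd v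
      = ebd.map (fun de => (de.1, F de ++ if de.1 = fd then [v] else [])) := by
  induction ebd with
  | nil => rfl
  | cons de rest ih =>
    simp only [List.map_cons, pvSetFirst]
    by_cases h : de.1 = fd
    · simp only [h, beq_self_eq_true, if_true, List.cons.injEq]
      refine ⟨trivial, ?_⟩
      refine (List.map_congr_left ?_)
      intro de' hde'
      have hne : de'.1 ≠ fd := by
        simp only [List.map_cons] at hnd
        have := (List.nodup_cons.mp hnd).1
        intro hcon
        have hm : de'.1 ∈ rest.map Prod.fst := List.mem_map_of_mem hde'
        rw [hcon, ← h] at hm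
        exact this hm
      simp [hne]
    · have hbeq : (de.1 == fd) = false := by simpa using h
      simp only [hbeq, if_false, Bool.false_eq_true]
      have hfd' : fd ∈ rest.map Prod.fst := by
        simp only [List.map_cons, List.mem_cons] at hfd
        rcases hfd with h1 | h1
        · exact absurd h1.symm h
        · exact h1
      have hnd' : (rest.map Prod.fst).Nodup := by
        simp only [List.map_cons] at hnd
        exact (List.nodup_cons.mp hnd).2
      rw [ih hnd' hfd']
      simp [h]

lemma pvFirst_eq {β : Type} [Inhabited β] (l : List (String × β)) (h : l ≠ []) :
    PySem.List.pyGetD (l.map Prod.fst) 0 "" = l.headI.1 := by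
  cases l with
  | nil => exact absurd rfl h
  | cons a t => simp [PySem.List.pyGetD_zero_cons]

lemma pvLast_eq {β : Type} [Inhabited β] (l : List (String × β)) (dflt : String × β) (h : l ≠ []) :
    PySem.List.pyGetD (l.map Prod.fst) (-1) "" = (l.getLastD dflt).1 := by
  have hm : l.map Prod.fst ≠ [] := by simpa using h
  rw [PySem.List.pyGetD_neg_one _ _ hm, List.getLast_map hm]
  cases l with
  | nil => exact absurd rfl h
  | cons a t => rw [List.getLast_eq_getLastD, List.getLastD_cons]

lemma pvEv0_eq {α : Type} [Inhabited α] (l : List α) (dflt : α) (h : l ≠ []) :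
    PySem.List.pyGetD l 0 dflt = l.headI := by
  cases l with
  | nil => exact absurd rfl h
  | cons a t => simp [PySem.List.pyGetD_zero_cons]

lemma pvStep2_shape (ebd : List (String × List (List (String × String))))
    (hnd : (ebd.map Prod.fst).Nodup) (S : List (String × String)) (k : String × String)
    (hk : k ∈ pvK ebd) (hS : ∀ q ∈ S, q ∈ pvK ebd) (hkS : k ∉ S)
    (hlen : ¬ (pvG ebd k).length < 2) :
    pvStep2 (pvShape ebd S) (k, pvG ebd k) = pvShape ebd (S ++ [k]) := by
  have hGne : pvG ebd k ≠ [] := pvG_ne ebd k hk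
  have hbeqc : ∀ a b : String × String, (a == b) = (b == a) := by
    intro a b
    by_cases h : a = b
    · simp [h]
    · simp [h, (Ne.symm h : b ≠ a)]
  rw [pvStep2]
  simp only [if_neg hlen]
  rw [pvG_days_sorted ebd k, pvFirst_eq _ hGne, pvLast_eq _ ("", []) hGne, pvEv0_eq _ ("", []) hGne]
  have hev : ((PySem.Dict.mk (pvG ebd k).headI.2).insert "schedule"
      ("Del " ++ pvFormatDateShort (pvG ebd k).headI.1 ++ " al "
        ++ pvFormatDateShort ((pvG ebd k).getLastD ("", [])).1)).items = pvRep (pvG ebd k) := rfl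
  rw [hev]
  rw [pvShape, List.map_map]
  simp only [Function.comp_def]
  have hfd : (pvG ebd k).headI.1 ∈ ebd.map Prod.fst := pvFd_mem_days ebd k hk
  rw [pvSetFirst_map ebd _ _ _ hnd hfd]
  rw [pvShape]
  refine List.map_congr_left ?_
  intro de _
  simp only [Prod.mk.injEq, true_and]
  rw [List.filter_append, List.filter_filter]
  have hkept : de.2.filter (fun e =>
        (pvEventKey e != k) && !(S.any (· == pvEventKey e)))
      = de.2.filter (fun e => !((S ++ [k]).any (· == pvEventKey e))) := by
    refine List.filter_congr ?_
    intro e _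
    rw [List.any_append]
    simp only [List.any_cons, List.any_nil, Bool.or_false, Bool.not_or, bne]
    rw [hbeqc k (pvEventKey e)]
    exact Bool.and_comm _ _
  have hreps : ((S.filter (fun q => (pvG ebd q).headI.1 == de.1)).map
        (fun q => pvRep (pvG ebd q))).filter (fun e => pvEventKey e != k)
      = (S.filter (fun q => (pvG ebd q).headI.1 == de.1)).map (fun q => pvRep (pvG ebd q)) := by
    refine List.filter_eq_self.mpr ?_
    intro x hx
    obtain ⟨q, hq, rfl⟩ := List.mem_map.mp hx
    have hqS : q ∈ S := List.mem_of_mem_filter hq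
    have hqk : pvEventKey (pvRep (pvG ebd q)) = q := pvKey_rep ebd q (hS q hqS)
    have hqne : q ≠ k := fun hcon => hkS (hcon ▸ hqS)
    simp [bne, hqk, hqne]
  rw [hkept, hreps]
  have htail : ((S ++ [k]).filter (fun q => (pvG ebd q).headI.1 == de.1)).map
        (fun q => pvRep (pvG ebd q))
      = (S.filter (fun q => (pvG ebd q).headI.1 == de.1)).map (fun q => pvRep (pvG ebd q))
        ++ (if de.1 = (pvG ebd k).headI.1 then [pvRep (pvG ebd k)] else []) := by
    rw [List.filter_append, List.map_append]
    congr 1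
    by_cases h : (pvG ebd k).headI.1 = de.1
    · simp [h]
    · have h2 : ¬ de.1 = (pvG ebd k).headI.1 := fun hcon => h hcon.symm
      simp [h, h2]
  rw [htail, List.append_assoc]

lemma pvPhase2 (ebd : List (String × List (List (String × String)))) (hnd : (ebd.map Prod.fst).Nodup) :
    ∀ (ks S : List (String × String)), (S ++ ks).Nodup → (∀ q ∈ S ++ ks, q ∈ pvK ebd) →
    (ks.map (fun k => (k, pvG ebd k))).foldl pvStep2 (pvShape ebd S)
      = pvShape ebd (S ++ ks.filter (fun k => !decide ((pvG ebd k).length < 2))) := by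
  intro ks
  induction ks with
  | nil => intro S _ _; simp
  | cons k ks ih =>
    intro S hnodup hmem
    simp only [List.map_cons, List.foldl_cons]
    by_cases h2 : (pvG ebd k).length < 2
    · have hstep : pvStep2 (pvShape ebd S) (k, pvG ebd k) = pvShape ebd S := by
        rw [pvStep2]; simp [h2]
      rw [hstep]
      have hsub : (S ++ ks).Sublist (S ++ k :: ks) :=
        List.Sublist.append (List.Sublist.refl S) (List.sublist_cons_self k ks)
      have hnodup' : (S ++ ks).Nodup := hsub.nodup hnodup
      rw [ih S hnodup' (fun q hq => hmem q (hsub.mem hq))]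
      congr 1
      simp only [List.filter_cons, h2, decide_true, Bool.not_true, if_false, Bool.false_eq_true]
    · have hkK : k ∈ pvK ebd := hmem k (by simp)
      have hkS : k ∉ S := by
        have hdisj := List.disjoint_of_nodup_append hnodup
        exact fun hcon => hdisj hcon (by simp)
      rw [pvStep2_shape ebd hnd S k hkK (fun q hq => hmem q (List.mem_append_left _ hq)) hkS h2]
      have hre : S ++ k :: ks = (S ++ [k]) ++ ks := by rw [List.append_cons]
      rw [hre] at hnodup hmem
      rw [ih (S ++ [k]) hnodup hmem]
      rw [List.filter_cons]
      simp only [h2, decide_false, Bool.not_false, if_true]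
      rw [← List.append_cons]

lemma pvShape_nil (ebd : List (String × List (List (String × String)))) : pvShape ebd [] = ebd := by
  simp [pvShape]

def pvRepsD (ebd : List (String × List (List (String × String)))) : PySem.Dict String (List (List (String × String))) :=
  (pvStats ebd).items.foldl (fun r q =>
    if q.2.1 ≥ 2 then
      let fe' := ((PySem.Dict.mk q.2.2.2.1).insert "schedule"
        ("Del " ++ pvFormatDateShort q.2.2.1 ++ " al " ++ pvFormatDateShort q.2.2.2.2)).items
      r.modify q.2.2.1 [] (· ++ [fe'])
    else r) PySem.Dict.empty

lemma pvB_eq (ebd : List (String × List (List (String × String)))) :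
    dedupe_repeating_events_alt ebd = ebd.map (fun de => (de.1,
      de.2.filter (fun ev => ((pvStats ebd).getD (pvEventKey ev) (0, "", [], "")).1 == 1)
        ++ (pvRepsD ebd).getD de.1 [])) := rfl

lemma pvDecideLen (n : Nat) : (decide (2 ≤ (n : Int))) = !decide (n < 2) := by
  by_cases h : n < 2
  · simp only [h, decide_true, Bool.not_true]
    simp only [decide_eq_false_iff_not]
    omega
  · simp only [h, decide_false, Bool.not_false]
    simp only [decide_eq_true_eq]
    omega

lemma pvStats_keys (ebd : List (String × List (List (String × String)))) :
    (pvStats ebd).keys = pvK ebd := by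
  have h0 : (pvStats ebd).keys = (pvStats ebd).items.map Prod.fst := rfl
  rw [h0, pvStats_items, List.map_map]
  simp [Function.comp_def]

lemma pvStats_getD (ebd : List (String × List (List (String × String)))) (k : String × String)
    (hk : k ∈ pvK ebd) :
    (pvStats ebd).getD k (0, "", [], "") = pvSummar (pvG ebd k) := by
  refine PySem.Dict.getD_of_mem_items _ ?_ ?_ _
  · rw [pvStats_items]; exact List.mem_map_of_mem hk
  · rw [pvStats_keys]; exact PySem.Set.nodup_ofList _

lemma pvRepsD_getD (ebd : List (String × List (List (String × String)))) (d : String) :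
    (pvRepsD ebd).getD d []
      = (((pvK ebd).filter (fun k => !decide ((pvG ebd k).length < 2))).filter
          (fun k => (pvG ebd k).headI.1 == d)).map (fun k => pvRep (pvG ebd k)) := by
  have h1 : pvRepsD ebd = (pvK ebd).foldl (fun r k =>
      if 2 ≤ ((pvG ebd k).length : Int) then
        r.modify ((pvG ebd k).headI.1) [] (· ++ [pvRep (pvG ebd k)]) else r)
      PySem.Dict.empty := by
    rw [pvRepsD, pvStats_items, List.foldl_map]
    rfl
  rw [h1, PySem.List.foldl_ite_eq_foldl_filter (p := fun k => 2 ≤ ((pvG ebd k).length : Int))]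
  have h2 : ((pvK ebd).filter (fun k => decide (2 ≤ ((pvG ebd k).length : Int))))
      = (pvK ebd).filter (fun k => !decide ((pvG ebd k).length < 2)) := by
    exact List.filter_congr (fun k _ => pvDecideLen _)
  rw [h2]
  rw [← List.foldl_map (f := fun k => ((pvG ebd k).headI.1, pvRep (pvG ebd k)))
    (g := fun (r : PySem.Dict String (List (List (String × String)))) p => r.modify p.1 [] (· ++ [p.2]))]
  rw [PySem.Dict.getD_foldl_modify_append]
  rw [List.filter_map, List.map_map]
  simp [Function.comp_def]

-- ===== VERDICT (by name: the statement is the Claim_ definition above) =====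
theorem dedupe_repeating_events_spec : Claim_equal_dedupe_repeating_events := by
  intro ebd _ hpre
  obtain ⟨hnd, _⟩ := hpre
  unfold Spec_dedupe_repeating_events
  rw [pvA_eq, pvByEvent_items]
  have hA := pvPhase2 ebd hnd (pvK ebd) [] (by simpa using PySem.Set.nodup_ofList _)
    (by intro q hq; simpa using hq)
  rw [pvShape_nil] at hA
  rw [hA, pvB_eq, List.nil_append, pvShape]
  refine List.map_congr_left ?_
  intro de hde
  simp only [Prod.mk.injEq, true_and]
  congr 1
  · refine List.filter_congr ?_
    intro e he
    have hkey : pvEventKey e ∈ pvK ebd := by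
      rw [pvK, PySem.Set.mem_ofList]
      exact List.mem_map.mpr ⟨(de.1, e), pvMem_occ ebd hnd de hde e he, rfl⟩
    have hGlen : 1 ≤ (pvG ebd (pvEventKey e)).length :=
      List.length_pos_iff.mpr (pvG_ne ebd (pvEventKey e) hkey)
    rw [pvStats_getD ebd (pvEventKey e) hkey]
    by_cases hn : (pvG ebd (pvEventKey e)).length < 2
    · have hL : ((pvSummar (pvG ebd (pvEventKey e))).1 == 1) = true := by
        simp only [pvSummar, beq_iff_eq]
        omega
      have hR : ((pvK ebd).filter (fun k => !decide ((pvG ebd k).length < 2))).any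
          (· == pvEventKey e) = false := by
        rw [List.any_eq_false]
        intro x hx hbe
        have hxk : x = pvEventKey e := by simpa using hbe
        have := (List.mem_filter.mp hx).2
        rw [hxk] at this
        simp [hn] at this
      rw [hL, hR]
      rfl
    · have hL : ((pvSummar (pvG ebd (pvEventKey e))).1 == 1) = false := by
        simp only [pvSummar, beq_eq_false_iff_ne, Ne]
        omega
      have hR : ((pvK ebd).filter (fun k => !decide ((pvG ebd k).length < 2))).any
          (· == pvEventKey e) = true := by
        rw [List.any_eq_true]
        exact ⟨pvEventKey e, List.mem_filter.mpr ⟨hkey, by simp [hn]⟩, by simp⟩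
      rw [hL, hR]
      rfl
  · rw [pvRepsD_getD]
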